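-- pv_equiv track=rewrite | github.com/Nadeflore/advent | day17.py | aggregatesones
-- ===== SOURCE A (Python) =====
-- def aggregatesones(commands):
--     count = 0
--     for cmd in commands:
--         if cmd == '1':
--             count += 1
--         else:
--             if count != 0:
--                 yield str(count)
--             count = 0
--             yield cmd
--
--     if count != 0:
--         yield str(count)
-- ===== SOURCE B (Python) =====
-- def aggregatesones(commands):
--     i, n = 0, len(commands)
--     while i < n:
--         j = i
--         while j < n and commands[j] == commands[i]:
--             j += 1
--         if commands[i] == '1':
--             yield str(j - i)
--         else:
--             for k in range(i, j):
--                 yield commands[k]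
--         i = j
-- ===== Notes on version B (the rewrite author's own statement) =====
-- stated objective: alternative
-- what changed: Replaced the running '1' counter with an index-based run scanner: each maximal run of equal commands is found with an inner while, then emitted as its length if it is a run of '1's or element by element otherwise.
import Mathlib
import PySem

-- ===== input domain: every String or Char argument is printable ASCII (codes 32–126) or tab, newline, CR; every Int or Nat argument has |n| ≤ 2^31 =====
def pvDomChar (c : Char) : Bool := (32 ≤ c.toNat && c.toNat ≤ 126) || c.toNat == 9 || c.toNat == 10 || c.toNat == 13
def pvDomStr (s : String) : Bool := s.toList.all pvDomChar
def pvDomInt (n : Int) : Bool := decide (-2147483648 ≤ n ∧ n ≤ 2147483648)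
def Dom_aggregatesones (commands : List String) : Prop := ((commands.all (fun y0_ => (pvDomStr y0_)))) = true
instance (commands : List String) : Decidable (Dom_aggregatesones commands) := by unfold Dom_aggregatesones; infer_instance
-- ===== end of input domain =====

-- B replaces A's running '1'-counter with an index-based maximal-run scanner (alternative decomposition, same O(n) cost).


-- ===== PORT A =====
-- A's loop: running Int counter of consecutive '1's, flushed before each non-'1' and at the end.
def aggregatesonesLoop (commands : List String) (count : Int) : List String :=
  match commands with
  | [] => if count ≠ 0 then [PySem.Int.toStr count] else []
  | cmd :: rest =>
    if cmd = "1" then aggregatesonesLoop rest (count + 1)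
    else (if count ≠ 0 then [PySem.Int.toStr count] else []) ++ cmd :: aggregatesonesLoop rest 0

def aggregatesones (commands : List String) : List String :=
  aggregatesonesLoop commands 0

-- ===== PORT B =====
-- B scans maximal runs of equal commands (the inner while = takeWhile/dropWhile on the tail);
-- a run of '1's becomes its length, any other run is emitted element by element.
def aggregatesones_alt (commands : List String) : List String :=
  match commands with
  | [] => []
  | x :: xs =>
    let run := xs.takeWhile (· == x)
    let rest := xs.dropWhile (· == x)
    (if x == "1" then [PySem.Int.toStr (1 + run.length)] else x :: run) ++ aggregatesones_alt rest
termination_by commands.length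
decreasing_by
  exact Nat.lt_succ_of_le (List.length_dropWhile_le _ _)

-- ===== PRECONDITION & SPEC =====
def Spec_aggregatesones (commands : List String) (out : List String) : Prop := out = aggregatesones_alt commands
instance (commands : List String) (out : List String) : Decidable (Spec_aggregatesones commands out) := by unfold Spec_aggregatesones; infer_instance

-- ===== CLAIM (what is proved, stated in full; the proofs are below) =====
def Claim_equal_aggregatesones : Prop := ∀ (commands : List String), Dom_aggregatesones commands → Spec_aggregatesones commands (aggregatesones commands)

-- ===== LEMMAS AND PROOFS =====

-- Skipping a leading non-'1' element: its run in B merges with the runs of the tail.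
lemma alt_cons_nonone (x : String) (xs : List String) (hx : x ≠ "1") :
    aggregatesones_alt (x :: xs) = x :: aggregatesones_alt xs := by
  match xs with
  | [] => simp [aggregatesones_alt, hx]
  | y :: ys =>
    by_cases hyx : y = x
    · subst hyx
      rw [aggregatesones_alt, aggregatesones_alt]
      simp [hx, List.takeWhile, List.dropWhile]
    · rw [aggregatesones_alt]
      simp [hx, hyx]

-- Combined invariant, by strong induction on a length bound:
-- with count 0 the loop equals B, and with positive count it flushes the merged run of '1's.
lemma loop_invariant (n : Nat) : ∀ xs : List String, xs.length ≤ n →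
    (aggregatesonesLoop xs 0 = aggregatesones_alt xs ∧
     ∀ c : Int, 0 ≤ c →
       aggregatesonesLoop xs (c + 1) =
         PySem.Int.toStr (c + 1 + (xs.takeWhile (· == "1")).length) ::
           aggregatesones_alt (xs.dropWhile (· == "1"))) := by
  induction n with
  | zero =>
    intro xs hxs
    have : xs = [] := List.eq_nil_of_length_eq_zero (Nat.le_zero.mp hxs)
    subst this
    constructor
    · simp [aggregatesonesLoop, aggregatesones_alt]
    · intro c hc
      have hne : c + 1 ≠ 0 := by omega
      simp [aggregatesonesLoop, aggregatesones_alt, hne]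
  | succ n ih =>
    intro xs hxs
    match xs with
    | [] =>
      constructor
      · simp [aggregatesonesLoop, aggregatesones_alt]
      · intro c hc
        have hne : c + 1 ≠ 0 := by omega
        simp [aggregatesonesLoop, aggregatesones_alt, hne]
    | x :: rest =>
      have hrest : rest.length ≤ n := by simpa using Nat.succ_le_succ_iff.mp hxs
      obtain ⟨ih0, ih1⟩ := ih rest hrest
      by_cases hx : x = "1"
      · subst hx
        constructor
        · rw [aggregatesonesLoop]
          simp only [if_true]
          rw [ih1 0 le_rfl, aggregatesones_alt]
          simp
        · intro c hc
          rw [aggregatesonesLoop]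
          rw [ih1 (c + 1) (by omega)]
          simp
          congr 1
          ring
      · constructor
        · rw [aggregatesonesLoop]
          simp only [if_neg hx]
          have hz : ¬ ((0:Int) ≠ 0) := by omega
          rw [if_neg hz, ih0, alt_cons_nonone x rest hx]
          rfl
        · intro c hc
          rw [aggregatesonesLoop]
          simp only [if_neg hx]
          have hne : c + 1 ≠ 0 := by omega
          rw [if_pos hne, ih0]
          have hxb : (x == "1") = false := by simpa using hx
          simp [hxb, alt_cons_nonone x rest hx]

-- ===== VERDICT (by name: the statement is the Claim_ definition above) =====
theorem aggregatesones_spec : Claim_equal_aggregatesones := by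
  intro commands _
  unfold Spec_aggregatesones aggregatesones
  exact (loop_invariant commands.length commands le_rfl).1
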